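-- pv_equiv track=rewrite | github.com/chitturics/obs-ai | chat_app/supervisor_agent.py | _infer_department
-- ===== SOURCE A (Python) =====
-- from typing import Any, Dict, List, Optional, Tuple
--
-- def _infer_department(task_desc: str) -> Optional[str]:
--     """Infer the best department for a sub-task."""
--     desc_lower = task_desc.lower()
--     if any(kw in desc_lower for kw in ("config", "props", "transforms", "inputs", "outputs")):
--         return "engineering"
--     if any(kw in desc_lower for kw in ("search", "spl", "query", "stats", "eval")):
--         return "data"
--     if any(kw in desc_lower for kw in ("deploy", "restart", "health", "monitor")):
--         return "operations"
--     if any(kw in desc_lower for kw in ("security", "auth", "encrypt", "cert")):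
--         return "security"
--     if any(kw in desc_lower for kw in ("dashboard", "report", "alert")):
--         return "knowledge"
--     return None
-- ===== SOURCE B (Python) =====
-- _FLAT_KEYWORDS = [
--     (0, "engineering", "config"), (0, "engineering", "props"),
--     (0, "engineering", "transforms"), (0, "engineering", "inputs"),
--     (0, "engineering", "outputs"),
--     (1, "data", "search"), (1, "data", "spl"), (1, "data", "query"),
--     (1, "data", "stats"), (1, "data", "eval"),
--     (2, "operations", "deploy"), (2, "operations", "restart"),
--     (2, "operations", "health"), (2, "operations", "monitor"),
--     (3, "security", "security"), (3, "security", "auth"),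
--     (3, "security", "encrypt"), (3, "security", "cert"),
--     (4, "knowledge", "dashboard"), (4, "knowledge", "report"),
--     (4, "knowledge", "alert"),
-- ]
--
-- def _infer_department(task_desc: str):
--     """Infer the best department for a sub-task."""
--     desc_lower = task_desc.lower()
--     best = None
--     for prio, dept, kw in _FLAT_KEYWORDS:
--         if kw in desc_lower and (best is None or prio < best[0]):
--             best = (prio, dept)
--     return best[1] if best is not None else None
-- ===== Notes on version B (the rewrite author's own statement) =====
-- stated objective: alternative
-- what changed: Replaces the five short-circuiting if-blocks by a single exhaustive pass over a flattened (priority, department, keyword) list that keeps the minimum-priority matching entry in an accumulator.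
import Mathlib
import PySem

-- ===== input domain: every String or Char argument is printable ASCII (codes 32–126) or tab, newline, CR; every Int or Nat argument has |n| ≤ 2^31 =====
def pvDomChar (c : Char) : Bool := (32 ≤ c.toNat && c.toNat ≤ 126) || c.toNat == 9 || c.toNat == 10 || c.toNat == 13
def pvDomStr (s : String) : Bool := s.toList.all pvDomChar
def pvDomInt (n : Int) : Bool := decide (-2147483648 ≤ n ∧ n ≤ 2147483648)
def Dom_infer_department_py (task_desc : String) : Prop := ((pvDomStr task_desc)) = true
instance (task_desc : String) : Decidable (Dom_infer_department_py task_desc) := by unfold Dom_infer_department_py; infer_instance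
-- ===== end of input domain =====

-- B replaces A's five short-circuiting if-blocks by one exhaustive pass over a flattened
-- (priority, department, keyword) list keeping the minimum-priority match; objective: alternative.

-- ===== PORT A =====
def infer_department_py (task_desc : String) : Option String :=
  let desc_lower := PySem.Str.lower task_desc
  if ["config", "props", "transforms", "inputs", "outputs"].any (fun kw => PySem.Str.isIn kw desc_lower) then
    some "engineering"
  else if ["search", "spl", "query", "stats", "eval"].any (fun kw => PySem.Str.isIn kw desc_lower) then
    some "data"
  else if ["deploy", "restart", "health", "monitor"].any (fun kw => PySem.Str.isIn kw desc_lower) then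
    some "operations"
  else if ["security", "auth", "encrypt", "cert"].any (fun kw => PySem.Str.isIn kw desc_lower) then
    some "security"
  else if ["dashboard", "report", "alert"].any (fun kw => PySem.Str.isIn kw desc_lower) then
    some "knowledge"
  else
    none

-- ===== PORT B =====
def pvFlatKeywords : List (Nat × String × String) :=
  [(0, "engineering", "config"), (0, "engineering", "props"),
   (0, "engineering", "transforms"), (0, "engineering", "inputs"),
   (0, "engineering", "outputs"),
   (1, "data", "search"), (1, "data", "spl"), (1, "data", "query"),
   (1, "data", "stats"), (1, "data", "eval"),
   (2, "operations", "deploy"), (2, "operations", "restart"),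
   (2, "operations", "health"), (2, "operations", "monitor"),
   (3, "security", "security"), (3, "security", "auth"),
   (3, "security", "encrypt"), (3, "security", "cert"),
   (4, "knowledge", "dashboard"), (4, "knowledge", "report"),
   (4, "knowledge", "alert")]

-- the loop body: keep the minimum-priority matching entry seen so far
def pvStep (d : String) (best : Option (Nat × String)) (t : Nat × String × String) :
    Option (Nat × String) :=
  if PySem.Str.isIn t.2.2 d && (match best with | none => true | some b => decide (t.1 < b.1)) then
    some (t.1, t.2.1)
  else best

def infer_department_py_alt (task_desc : String) : Option String :=
  let desc_lower := PySem.Str.lower task_desc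
  match pvFlatKeywords.foldl (pvStep desc_lower) none with
  | some b => some b.2
  | none => none

-- ===== PRECONDITION & SPEC =====
def Spec_infer_department_py (task_desc : String) (out : Option String) : Prop := out = infer_department_py_alt task_desc
instance (task_desc : String) (out : Option String) : Decidable (Spec_infer_department_py task_desc out) := by unfold Spec_infer_department_py; infer_instance

-- ===== CLAIM (what is proved, stated in full; the proofs are below) =====
def Claim_equal_infer_department_py : Prop := ∀ (task_desc : String), Dom_infer_department_py task_desc → Spec_infer_department_py task_desc (infer_department_py task_desc)

-- ===== LEMMAS AND PROOFS =====

-- if nothing in l matches, the accumulator stays none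
theorem pvFold_none (d : String) (l : List (Nat × String × String))
    (h : ∀ t ∈ l, PySem.Str.isIn t.2.2 d = false) :
    l.foldl (pvStep d) none = none := by
  induction l with
  | nil => rfl
  | cons x xs ih =>
    have hx := h x (List.mem_cons_self ..)
    simp only [List.foldl_cons, pvStep, hx, Bool.false_and, if_neg Bool.false_ne_true]
    exact ih (fun t ht => h t (List.mem_cons_of_mem _ ht))

-- once the accumulator holds priority k and no later match has smaller priority, it is final
theorem pvFold_keep (d : String) (l : List (Nat × String × String)) (b : Nat × String)
    (h : ∀ t ∈ l, PySem.Str.isIn t.2.2 d = true → b.1 ≤ t.1) :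
    l.foldl (pvStep d) (some b) = some b := by
  induction l with
  | nil => rfl
  | cons x xs ih =>
    have step : pvStep d (some b) x = some b := by
      unfold pvStep
      by_cases hm : PySem.Str.isIn x.2.2 d = true
      · have hle := h x (List.mem_cons_self ..) hm
        rw [hm]
        simp [Nat.not_lt.mpr hle]
      · rw [Bool.eq_false_iff.mpr hm]
        simp
    simp only [List.foldl_cons, step]
    exact ih (fun t ht => h t (List.mem_cons_of_mem _ ht))

-- the fold returns (k, dept) when: entries are sorted by priority, some entry of priority k
-- and department dept matches, and every matching entry has priority ≥ k with department dept at k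
theorem pvFold_main (d : String) (l : List (Nat × String × String)) (k : Nat) (dept : String)
    (hsort : l.Pairwise (fun a b => a.1 ≤ b.1))
    (hlow : ∀ t ∈ l, PySem.Str.isIn t.2.2 d = true → k ≤ t.1)
    (hdep : ∀ t ∈ l, t.1 = k → t.2.1 = dept)
    (hwit : ∃ t ∈ l, t.1 = k ∧ PySem.Str.isIn t.2.2 d = true) :
    l.foldl (pvStep d) none = some (k, dept) := by
  induction l with
  | nil => rcases hwit with ⟨t, ht, _⟩; exact absurd ht (List.not_mem_nil)
  | cons x xs ih =>
    rcases List.pairwise_cons.mp hsort with ⟨hx_le, hsort'⟩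
    by_cases hm : PySem.Str.isIn x.2.2 d = true
    · -- x matches, so k ≤ x.1
      have hk_le : k ≤ x.1 := hlow x (List.mem_cons_self ..) hm
      have hx_eq : x.1 = k := by
        rcases Nat.eq_or_lt_of_le hk_le with h | h
        · omega
        · -- x.1 > k: the witness must be in xs, but all of xs has priority ≥ x.1 > k
          rcases hwit with ⟨t, ht, htk, htm⟩
          rcases List.mem_cons.mp ht with rfl | ht'
          · omega
          · have := hx_le t ht'; omega
      have hxd : x.2.1 = dept := hdep x (List.mem_cons_self ..) hx_eq
      have step : pvStep d none x = some (k, dept) := by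
        unfold pvStep; rw [hm]; simp [hx_eq, hxd]
      simp only [List.foldl_cons, step]
      exact pvFold_keep d xs (k, dept)
        (fun t ht htm => hlow t (List.mem_cons_of_mem _ ht) htm)
    · have hm' : PySem.Chars.isIn x.2.2.toList d.toList = false := by
        simpa [PySem.Str.isIn] using Bool.eq_false_iff.mpr hm
      have step : pvStep d none x = none := by
        unfold pvStep; simp [PySem.Str.isIn, hm']
      simp only [List.foldl_cons, step]
      refine ih hsort' (fun t ht => hlow t (List.mem_cons_of_mem _ ht))
        (fun t ht => hdep t (List.mem_cons_of_mem _ ht)) ?_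
      rcases hwit with ⟨t, ht, htk, htm⟩
      rcases List.mem_cons.mp ht with rfl | ht'
      · exact absurd htm hm
      · exact ⟨t, ht', htk, htm⟩

-- ===== VERDICT (by name: the statement is the Claim_ definition above) =====
theorem infer_department_py_spec : Claim_equal_infer_department_py := by
  intro s _
  unfold Spec_infer_department_py infer_department_py infer_department_py_alt
  set d := PySem.Str.lower s with hd
  simp only [List.any_cons, List.any_nil, Bool.or_false, Bool.or_eq_true]
  split_ifs with h1 h2 h3 h4 h5
  all_goals simp only [not_or, Bool.not_eq_true] at *
  · rw [pvFold_main d pvFlatKeywords 0 "engineering" (by decide)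
      (fun t _ _ => Nat.zero_le _)
      (by intro t ht hk; unfold pvFlatKeywords at ht; fin_cases ht <;> simp_all)
      (by rcases h1 with h | h | h | h | h
          · exact ⟨(0, "engineering", "config"), by unfold pvFlatKeywords; simp, rfl, h⟩
          · exact ⟨(0, "engineering", "props"), by unfold pvFlatKeywords; simp, rfl, h⟩
          · exact ⟨(0, "engineering", "transforms"), by unfold pvFlatKeywords; simp, rfl, h⟩
          · exact ⟨(0, "engineering", "inputs"), by unfold pvFlatKeywords; simp, rfl, h⟩
          · exact ⟨(0, "engineering", "outputs"), by unfold pvFlatKeywords; simp, rfl, h⟩)]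
  · obtain ⟨n1, n2, n3, n4, n5⟩ := h1
    rw [pvFold_main d pvFlatKeywords 1 "data" (by decide)
      (by intro t ht hm; unfold pvFlatKeywords at ht; fin_cases ht <;> simp_all)
      (by intro t ht hk; unfold pvFlatKeywords at ht; fin_cases ht <;> simp_all)
      (by rcases h2 with h | h | h | h | h
          · exact ⟨(1, "data", "search"), by unfold pvFlatKeywords; simp, rfl, h⟩
          · exact ⟨(1, "data", "spl"), by unfold pvFlatKeywords; simp, rfl, h⟩
          · exact ⟨(1, "data", "query"), by unfold pvFlatKeywords; simp, rfl, h⟩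
          · exact ⟨(1, "data", "stats"), by unfold pvFlatKeywords; simp, rfl, h⟩
          · exact ⟨(1, "data", "eval"), by unfold pvFlatKeywords; simp, rfl, h⟩)]
  · obtain ⟨n1, n2, n3, n4, n5⟩ := h1
    obtain ⟨m1, m2, m3, m4, m5⟩ := h2
    rw [pvFold_main d pvFlatKeywords 2 "operations" (by decide)
      (by intro t ht hm; unfold pvFlatKeywords at ht; fin_cases ht <;> simp_all)
      (by intro t ht hk; unfold pvFlatKeywords at ht; fin_cases ht <;> simp_all)
      (by rcases h3 with h | h | h | h
          · exact ⟨(2, "operations", "deploy"), by unfold pvFlatKeywords; simp, rfl, h⟩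
          · exact ⟨(2, "operations", "restart"), by unfold pvFlatKeywords; simp, rfl, h⟩
          · exact ⟨(2, "operations", "health"), by unfold pvFlatKeywords; simp, rfl, h⟩
          · exact ⟨(2, "operations", "monitor"), by unfold pvFlatKeywords; simp, rfl, h⟩)]
  · obtain ⟨n1, n2, n3, n4, n5⟩ := h1
    obtain ⟨m1, m2, m3, m4, m5⟩ := h2
    obtain ⟨o1, o2, o3, o4⟩ := h3
    rw [pvFold_main d pvFlatKeywords 3 "security" (by decide)
      (by intro t ht hm; unfold pvFlatKeywords at ht; fin_cases ht <;> simp_all)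
      (by intro t ht hk; unfold pvFlatKeywords at ht; fin_cases ht <;> simp_all)
      (by rcases h4 with h | h | h | h
          · exact ⟨(3, "security", "security"), by unfold pvFlatKeywords; simp, rfl, h⟩
          · exact ⟨(3, "security", "auth"), by unfold pvFlatKeywords; simp, rfl, h⟩
          · exact ⟨(3, "security", "encrypt"), by unfold pvFlatKeywords; simp, rfl, h⟩
          · exact ⟨(3, "security", "cert"), by unfold pvFlatKeywords; simp, rfl, h⟩)]
  · obtain ⟨n1, n2, n3, n4, n5⟩ := h1
    obtain ⟨m1, m2, m3, m4, m5⟩ := h2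
    obtain ⟨o1, o2, o3, o4⟩ := h3
    obtain ⟨p1, p2, p3, p4⟩ := h4
    rw [pvFold_main d pvFlatKeywords 4 "knowledge" (by decide)
      (by intro t ht hm; unfold pvFlatKeywords at ht; fin_cases ht <;> simp_all)
      (by intro t ht hk; unfold pvFlatKeywords at ht; fin_cases ht <;> simp_all)
      (by rcases h5 with h | h | h
          · exact ⟨(4, "knowledge", "dashboard"), by unfold pvFlatKeywords; simp, rfl, h⟩
          · exact ⟨(4, "knowledge", "report"), by unfold pvFlatKeywords; simp, rfl, h⟩
          · exact ⟨(4, "knowledge", "alert"), by unfold pvFlatKeywords; simp, rfl, h⟩)]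
  · obtain ⟨n1, n2, n3, n4, n5⟩ := h1
    obtain ⟨m1, m2, m3, m4, m5⟩ := h2
    obtain ⟨o1, o2, o3, o4⟩ := h3
    obtain ⟨p1, p2, p3, p4⟩ := h4
    obtain ⟨q1, q2, q3⟩ := h5
    rw [pvFold_none d pvFlatKeywords
      (by intro t ht; unfold pvFlatKeywords at ht; fin_cases ht <;> simp_all)]
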